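-- pv_equiv track=rewrite | github.com/mithunvoe/text2sql-analytics-system | src/query_history.py | _extract_pattern
-- ===== SOURCE A (Python) =====
-- def _extract_pattern(natural_language: str) -> str:
--     """
--     Extract query pattern from natural language
--     (Simplified version - could be enhanced with NLP)
--     """
--     nl_lower = natural_language.lower()
--
--     # Identify query type
--     if any(word in nl_lower for word in ['how many', 'count', 'number of']):
--         pattern = 'COUNT_QUERY'
--     elif any(word in nl_lower for word in ['list', 'show', 'display', 'get']):
--         pattern = 'LIST_QUERY'
--     elif any(word in nl_lower for word in ['average', 'avg', 'mean']):
--         pattern = 'AVERAGE_QUERY'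
--     elif any(word in nl_lower for word in ['total', 'sum']):
--         pattern = 'SUM_QUERY'
--     elif any(word in nl_lower for word in ['max', 'maximum', 'highest', 'most']):
--         pattern = 'MAX_QUERY'
--     elif any(word in nl_lower for word in ['min', 'minimum', 'lowest', 'least']):
--         pattern = 'MIN_QUERY'
--     elif any(word in nl_lower for word in ['trend', 'over time', 'by month', 'by year']):
--         pattern = 'TREND_QUERY'
--     elif any(word in nl_lower for word in ['top', 'best', 'highest ranked']):
--         pattern = 'TOP_N_QUERY'
--     else:
--         pattern = 'GENERAL_QUERY'
--
--     return pattern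
-- ===== SOURCE B (Python) =====
-- # Flat keyword -> (priority, label) map; one pass keeps the best (lowest-priority)
-- # matching keyword instead of a grouped if/elif cascade.
-- _KEYWORD_PRIORITY = {
--     'how many': (0, 'COUNT_QUERY'), 'count': (0, 'COUNT_QUERY'), 'number of': (0, 'COUNT_QUERY'),
--     'list': (1, 'LIST_QUERY'), 'show': (1, 'LIST_QUERY'), 'display': (1, 'LIST_QUERY'), 'get': (1, 'LIST_QUERY'),
--     'average': (2, 'AVERAGE_QUERY'), 'avg': (2, 'AVERAGE_QUERY'), 'mean': (2, 'AVERAGE_QUERY'),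
--     'total': (3, 'SUM_QUERY'), 'sum': (3, 'SUM_QUERY'),
--     'max': (4, 'MAX_QUERY'), 'maximum': (4, 'MAX_QUERY'), 'highest': (4, 'MAX_QUERY'), 'most': (4, 'MAX_QUERY'),
--     'min': (5, 'MIN_QUERY'), 'minimum': (5, 'MIN_QUERY'), 'lowest': (5, 'MIN_QUERY'), 'least': (5, 'MIN_QUERY'),
--     'trend': (6, 'TREND_QUERY'), 'over time': (6, 'TREND_QUERY'), 'by month': (6, 'TREND_QUERY'), 'by year': (6, 'TREND_QUERY'),
--     'top': (7, 'TOP_N_QUERY'), 'best': (7, 'TOP_N_QUERY'), 'highest ranked': (7, 'TOP_N_QUERY'),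
-- }
--
--
-- def _extract_pattern(natural_language: str) -> str:
--     nl_lower = natural_language.lower()
--     best = None
--     for kw, (prio, label) in _KEYWORD_PRIORITY.items():
--         if kw in nl_lower and (best is None or prio < best[0]):
--             best = (prio, label)
--     return best[1] if best is not None else 'GENERAL_QUERY'
-- ===== Notes on version B (the rewrite author's own statement) =====
-- stated objective: idiomatic
-- what changed: Replaces the grouped if/elif cascade (short-circuit, first group wins) by a single pass over a flat keyword->(priority,label) map that keeps the lowest-priority matching keyword in an argmin accumulator.
import Mathlib
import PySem

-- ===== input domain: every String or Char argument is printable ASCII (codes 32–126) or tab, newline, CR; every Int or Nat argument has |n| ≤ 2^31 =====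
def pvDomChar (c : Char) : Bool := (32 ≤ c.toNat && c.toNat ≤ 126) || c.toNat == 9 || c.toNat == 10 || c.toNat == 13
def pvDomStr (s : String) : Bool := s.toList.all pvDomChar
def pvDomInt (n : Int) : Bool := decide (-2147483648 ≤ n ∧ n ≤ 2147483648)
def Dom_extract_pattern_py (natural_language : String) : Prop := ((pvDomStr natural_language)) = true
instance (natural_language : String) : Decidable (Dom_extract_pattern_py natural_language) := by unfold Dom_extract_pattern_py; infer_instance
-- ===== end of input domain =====

-- B replaces A's grouped if/elif cascade by one pass over a flat keyword→(priority,label) map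
-- keeping the lowest-priority match (argmin accumulator); idiomatic, same cost.

-- ===== PORT A =====
-- literal transliteration of the if/elif cascade; 'w in s' is PySem.Str.isIn
def extract_pattern_py (natural_language : String) : String :=
  let nl_lower := PySem.Str.lower natural_language
  if (["how many", "count", "number of"] : List String).any (fun w => PySem.Str.isIn w nl_lower) then
    "COUNT_QUERY"
  else if (["list", "show", "display", "get"] : List String).any (fun w => PySem.Str.isIn w nl_lower) then
    "LIST_QUERY"
  else if (["average", "avg", "mean"] : List String).any (fun w => PySem.Str.isIn w nl_lower) then
    "AVERAGE_QUERY"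
  else if (["total", "sum"] : List String).any (fun w => PySem.Str.isIn w nl_lower) then
    "SUM_QUERY"
  else if (["max", "maximum", "highest", "most"] : List String).any (fun w => PySem.Str.isIn w nl_lower) then
    "MAX_QUERY"
  else if (["min", "minimum", "lowest", "least"] : List String).any (fun w => PySem.Str.isIn w nl_lower) then
    "MIN_QUERY"
  else if (["trend", "over time", "by month", "by year"] : List String).any (fun w => PySem.Str.isIn w nl_lower) then
    "TREND_QUERY"
  else if (["top", "best", "highest ranked"] : List String).any (fun w => PySem.Str.isIn w nl_lower) then
    "TOP_N_QUERY"
  else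
    "GENERAL_QUERY"

-- ===== PORT B =====
-- the flat keyword → (priority, label) map of Source B, in insertion order
def pvFlatKeywords : List (Nat × String × String) :=
  [(0, "how many", "COUNT_QUERY"),
   (0, "count", "COUNT_QUERY"),
   (0, "number of", "COUNT_QUERY"),
   (1, "list", "LIST_QUERY"),
   (1, "show", "LIST_QUERY"),
   (1, "display", "LIST_QUERY"),
   (1, "get", "LIST_QUERY"),
   (2, "average", "AVERAGE_QUERY"),
   (2, "avg", "AVERAGE_QUERY"),
   (2, "mean", "AVERAGE_QUERY"),
   (3, "total", "SUM_QUERY"),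
   (3, "sum", "SUM_QUERY"),
   (4, "max", "MAX_QUERY"),
   (4, "maximum", "MAX_QUERY"),
   (4, "highest", "MAX_QUERY"),
   (4, "most", "MAX_QUERY"),
   (5, "min", "MIN_QUERY"),
   (5, "minimum", "MIN_QUERY"),
   (5, "lowest", "MIN_QUERY"),
   (5, "least", "MIN_QUERY"),
   (6, "trend", "TREND_QUERY"),
   (6, "over time", "TREND_QUERY"),
   (6, "by month", "TREND_QUERY"),
   (6, "by year", "TREND_QUERY"),
   (7, "top", "TOP_N_QUERY"),
   (7, "best", "TOP_N_QUERY"),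
   (7, "highest ranked", "TOP_N_QUERY")]

-- 'best is None or prio < best[0]'
def pvBetter (p : Nat) : Option (Nat × String) → Bool
  | none => true
  | some b => decide (p < b.1)

-- one loop iteration: keep the lowest-priority matching keyword seen so far
def pvStep (nl_lower : String) (best : Option (Nat × String)) (e : Nat × String × String) : Option (Nat × String) :=
  if PySem.Str.isIn e.2.1 nl_lower && pvBetter e.1 best then some (e.1, e.2.2) else best

def extract_pattern_py_alt (natural_language : String) : String :=
  let nl_lower := PySem.Str.lower natural_language
  match pvFlatKeywords.foldl (pvStep nl_lower) none with
  | some b => b.2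
  | none => "GENERAL_QUERY"

-- ===== PRECONDITION & SPEC =====
def Spec_extract_pattern_py (natural_language : String) (out : String) : Prop := out = extract_pattern_py_alt natural_language
instance (natural_language : String) (out : String) : Decidable (Spec_extract_pattern_py natural_language out) := by unfold Spec_extract_pattern_py; infer_instance

-- ===== CLAIM (what is proved, stated in full; the proofs are below) =====
def Claim_equal_extract_pattern_py : Prop := ∀ (natural_language : String), Dom_extract_pattern_py natural_language → Spec_extract_pattern_py natural_language (extract_pattern_py natural_language)

-- ===== LEMMAS AND PROOFS =====

-- a non-matching keyword leaves the accumulator unchanged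
theorem pvSkip (nl : String) (p : Nat) (kw lab : String) (l : List (Nat × String × String))
    (acc : Option (Nat × String)) (h : PySem.Str.isIn kw nl = false) :
    List.foldl (pvStep nl) acc ((p, kw, lab) :: l) = List.foldl (pvStep nl) acc l := by
  have hstep : pvStep nl acc (p, kw, lab) = acc := by
    simp only [pvStep, h, Bool.false_and]
    rfl
  rw [List.foldl_cons, hstep]

-- the first match (from an empty accumulator) sets the accumulator
theorem pvHit (nl : String) (p : Nat) (kw lab : String) (l : List (Nat × String × String))
    (h : PySem.Str.isIn kw nl = true) :
    List.foldl (pvStep nl) none ((p, kw, lab) :: l) = List.foldl (pvStep nl) (some (p, lab)) l := by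
  have hstep : pvStep nl none (p, kw, lab) = some (p, lab) := by
    simp only [pvStep, pvBetter, h, Bool.and_true]
    rfl
  rw [List.foldl_cons, hstep]

-- once set, an accumulator whose priority is ≤ all remaining priorities never changes
theorem pvSat (nl : String) (p : Nat) (lab : String) :
    ∀ (l : List (Nat × String × String)), (l.all (fun e => decide (p ≤ e.1)) = true) →
      List.foldl (pvStep nl) (some (p, lab)) l = some (p, lab)
  | [], _ => rfl
  | e :: l, h => by
    simp only [List.all_cons, Bool.and_eq_true, decide_eq_true_eq] at h
    have hstep : pvStep nl (some (p, lab)) e = some (p, lab) := by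
      simp only [pvStep, pvBetter, decide_eq_false (Nat.not_lt.mpr h.1), Bool.and_false]
      rfl
    rw [List.foldl_cons, hstep]
    exact pvSat nl p lab l (by simpa using h.2)

-- ===== VERDICT (by name: the statement is the Claim_ definition above) =====
theorem extract_pattern_py_spec : Claim_equal_extract_pattern_py := by
  intro s _
  unfold Spec_extract_pattern_py extract_pattern_py extract_pattern_py_alt pvFlatKeywords
  simp only []
  cases hb0 : PySem.Str.isIn "how many" (PySem.Str.lower s) with
  | true =>
      rw [pvHit _ _ _ _ _ hb0, pvSat _ _ _ _ (by decide)]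
      simp only [hb0, List.any_cons, List.any_nil, Bool.true_or, Bool.or_false]
      rfl
  | false =>
    cases hb1 : PySem.Str.isIn "count" (PySem.Str.lower s) with
    | true =>
        rw [pvSkip _ _ _ _ _ _ hb0, pvHit _ _ _ _ _ hb1, pvSat _ _ _ _ (by decide)]
        simp only [hb0, hb1, List.any_cons, List.any_nil, Bool.or_true, Bool.true_or, Bool.or_false]
        rfl
    | false =>
      cases hb2 : PySem.Str.isIn "number of" (PySem.Str.lower s) with
      | true =>
          rw [pvSkip _ _ _ _ _ _ hb0, pvSkip _ _ _ _ _ _ hb1, pvHit _ _ _ _ _ hb2, pvSat _ _ _ _ (by decide)]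
          simp only [hb0, hb1, hb2, List.any_cons, List.any_nil, Bool.or_true, Bool.or_false]
          rfl
      | false =>
        cases hb3 : PySem.Str.isIn "list" (PySem.Str.lower s) with
        | true =>
            rw [pvSkip _ _ _ _ _ _ hb0, pvSkip _ _ _ _ _ _ hb1, pvSkip _ _ _ _ _ _ hb2, pvHit _ _ _ _ _ hb3, pvSat _ _ _ _ (by decide)]
            simp only [hb0, hb1, hb2, hb3, List.any_cons, List.any_nil, Bool.true_or, Bool.or_false]
            rfl
        | false =>
          cases hb4 : PySem.Str.isIn "show" (PySem.Str.lower s) with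
          | true =>
              rw [pvSkip _ _ _ _ _ _ hb0, pvSkip _ _ _ _ _ _ hb1, pvSkip _ _ _ _ _ _ hb2, pvSkip _ _ _ _ _ _ hb3, pvHit _ _ _ _ _ hb4, pvSat _ _ _ _ (by decide)]
              simp only [hb0, hb1, hb2, hb3, hb4, List.any_cons, List.any_nil, Bool.or_true, Bool.true_or, Bool.or_false]
              rfl
          | false =>
            cases hb5 : PySem.Str.isIn "display" (PySem.Str.lower s) with
            | true =>
                rw [pvSkip _ _ _ _ _ _ hb0, pvSkip _ _ _ _ _ _ hb1, pvSkip _ _ _ _ _ _ hb2, pvSkip _ _ _ _ _ _ hb3, pvSkip _ _ _ _ _ _ hb4, pvHit _ _ _ _ _ hb5, pvSat _ _ _ _ (by decide)]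
                simp only [hb0, hb1, hb2, hb3, hb4, hb5, List.any_cons, List.any_nil, Bool.or_true, Bool.true_or, Bool.or_false]
                rfl
            | false =>
              cases hb6 : PySem.Str.isIn "get" (PySem.Str.lower s) with
              | true =>
                  rw [pvSkip _ _ _ _ _ _ hb0, pvSkip _ _ _ _ _ _ hb1, pvSkip _ _ _ _ _ _ hb2, pvSkip _ _ _ _ _ _ hb3, pvSkip _ _ _ _ _ _ hb4, pvSkip _ _ _ _ _ _ hb5, pvHit _ _ _ _ _ hb6, pvSat _ _ _ _ (by decide)]
                  simp only [hb0, hb1, hb2, hb3, hb4, hb5, hb6, List.any_cons, List.any_nil, Bool.or_true, Bool.or_false]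
                  rfl
              | false =>
                cases hb7 : PySem.Str.isIn "average" (PySem.Str.lower s) with
                | true =>
                    rw [pvSkip _ _ _ _ _ _ hb0, pvSkip _ _ _ _ _ _ hb1, pvSkip _ _ _ _ _ _ hb2, pvSkip _ _ _ _ _ _ hb3, pvSkip _ _ _ _ _ _ hb4, pvSkip _ _ _ _ _ _ hb5, pvSkip _ _ _ _ _ _ hb6, pvHit _ _ _ _ _ hb7, pvSat _ _ _ _ (by decide)]
                    simp only [hb0, hb1, hb2, hb3, hb4, hb5, hb6, hb7, List.any_cons, List.any_nil, Bool.true_or, Bool.or_false]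
                    rfl
                | false =>
                  cases hb8 : PySem.Str.isIn "avg" (PySem.Str.lower s) with
                  | true =>
                      rw [pvSkip _ _ _ _ _ _ hb0, pvSkip _ _ _ _ _ _ hb1, pvSkip _ _ _ _ _ _ hb2, pvSkip _ _ _ _ _ _ hb3, pvSkip _ _ _ _ _ _ hb4, pvSkip _ _ _ _ _ _ hb5, pvSkip _ _ _ _ _ _ hb6, pvSkip _ _ _ _ _ _ hb7, pvHit _ _ _ _ _ hb8, pvSat _ _ _ _ (by decide)]
                      simp only [hb0, hb1, hb2, hb3, hb4, hb5, hb6, hb7, hb8, List.any_cons, List.any_nil, Bool.or_true, Bool.true_or, Bool.or_false]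
                      rfl
                  | false =>
                    cases hb9 : PySem.Str.isIn "mean" (PySem.Str.lower s) with
                    | true =>
                        rw [pvSkip _ _ _ _ _ _ hb0, pvSkip _ _ _ _ _ _ hb1, pvSkip _ _ _ _ _ _ hb2, pvSkip _ _ _ _ _ _ hb3, pvSkip _ _ _ _ _ _ hb4, pvSkip _ _ _ _ _ _ hb5, pvSkip _ _ _ _ _ _ hb6, pvSkip _ _ _ _ _ _ hb7, pvSkip _ _ _ _ _ _ hb8, pvHit _ _ _ _ _ hb9, pvSat _ _ _ _ (by decide)]
                        simp only [hb0, hb1, hb2, hb3, hb4, hb5, hb6, hb7, hb8, hb9, List.any_cons, List.any_nil, Bool.or_true, Bool.or_false]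
                        rfl
                    | false =>
                      cases hb10 : PySem.Str.isIn "total" (PySem.Str.lower s) with
                      | true =>
                          rw [pvSkip _ _ _ _ _ _ hb0, pvSkip _ _ _ _ _ _ hb1, pvSkip _ _ _ _ _ _ hb2, pvSkip _ _ _ _ _ _ hb3, pvSkip _ _ _ _ _ _ hb4, pvSkip _ _ _ _ _ _ hb5, pvSkip _ _ _ _ _ _ hb6, pvSkip _ _ _ _ _ _ hb7, pvSkip _ _ _ _ _ _ hb8, pvSkip _ _ _ _ _ _ hb9, pvHit _ _ _ _ _ hb10, pvSat _ _ _ _ (by decide)]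
                          simp only [hb0, hb1, hb2, hb3, hb4, hb5, hb6, hb7, hb8, hb9, hb10, List.any_cons, List.any_nil, Bool.true_or, Bool.or_false]
                          rfl
                      | false =>
                        cases hb11 : PySem.Str.isIn "sum" (PySem.Str.lower s) with
                        | true =>
                            rw [pvSkip _ _ _ _ _ _ hb0, pvSkip _ _ _ _ _ _ hb1, pvSkip _ _ _ _ _ _ hb2, pvSkip _ _ _ _ _ _ hb3, pvSkip _ _ _ _ _ _ hb4, pvSkip _ _ _ _ _ _ hb5, pvSkip _ _ _ _ _ _ hb6, pvSkip _ _ _ _ _ _ hb7, pvSkip _ _ _ _ _ _ hb8, pvSkip _ _ _ _ _ _ hb9, pvSkip _ _ _ _ _ _ hb10, pvHit _ _ _ _ _ hb11, pvSat _ _ _ _ (by decide)]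
                            simp only [hb0, hb1, hb2, hb3, hb4, hb5, hb6, hb7, hb8, hb9, hb10, hb11, List.any_cons, List.any_nil, Bool.or_true, Bool.or_false]
                            rfl
                        | false =>
                          cases hb12 : PySem.Str.isIn "max" (PySem.Str.lower s) with
                          | true =>
                              rw [pvSkip _ _ _ _ _ _ hb0, pvSkip _ _ _ _ _ _ hb1, pvSkip _ _ _ _ _ _ hb2, pvSkip _ _ _ _ _ _ hb3, pvSkip _ _ _ _ _ _ hb4, pvSkip _ _ _ _ _ _ hb5, pvSkip _ _ _ _ _ _ hb6, pvSkip _ _ _ _ _ _ hb7, pvSkip _ _ _ _ _ _ hb8, pvSkip _ _ _ _ _ _ hb9, pvSkip _ _ _ _ _ _ hb10, pvSkip _ _ _ _ _ _ hb11, pvHit _ _ _ _ _ hb12, pvSat _ _ _ _ (by decide)]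
                              simp only [hb0, hb1, hb2, hb3, hb4, hb5, hb6, hb7, hb8, hb9, hb10, hb11, hb12, List.any_cons, List.any_nil, Bool.true_or, Bool.or_false]
                              rfl
                          | false =>
                            cases hb13 : PySem.Str.isIn "maximum" (PySem.Str.lower s) with
                            | true =>
                                rw [pvSkip _ _ _ _ _ _ hb0, pvSkip _ _ _ _ _ _ hb1, pvSkip _ _ _ _ _ _ hb2, pvSkip _ _ _ _ _ _ hb3, pvSkip _ _ _ _ _ _ hb4, pvSkip _ _ _ _ _ _ hb5, pvSkip _ _ _ _ _ _ hb6, pvSkip _ _ _ _ _ _ hb7, pvSkip _ _ _ _ _ _ hb8, pvSkip _ _ _ _ _ _ hb9, pvSkip _ _ _ _ _ _ hb10, pvSkip _ _ _ _ _ _ hb11, pvSkip _ _ _ _ _ _ hb12, pvHit _ _ _ _ _ hb13, pvSat _ _ _ _ (by decide)]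
                                simp only [hb0, hb1, hb2, hb3, hb4, hb5, hb6, hb7, hb8, hb9, hb10, hb11, hb12, hb13, List.any_cons, List.any_nil, Bool.or_true, Bool.true_or, Bool.or_false]
                                rfl
                            | false =>
                              cases hb14 : PySem.Str.isIn "highest" (PySem.Str.lower s) with
                              | true =>
                                  rw [pvSkip _ _ _ _ _ _ hb0, pvSkip _ _ _ _ _ _ hb1, pvSkip _ _ _ _ _ _ hb2, pvSkip _ _ _ _ _ _ hb3, pvSkip _ _ _ _ _ _ hb4, pvSkip _ _ _ _ _ _ hb5, pvSkip _ _ _ _ _ _ hb6, pvSkip _ _ _ _ _ _ hb7, pvSkip _ _ _ _ _ _ hb8, pvSkip _ _ _ _ _ _ hb9, pvSkip _ _ _ _ _ _ hb10, pvSkip _ _ _ _ _ _ hb11, pvSkip _ _ _ _ _ _ hb12, pvSkip _ _ _ _ _ _ hb13, pvHit _ _ _ _ _ hb14, pvSat _ _ _ _ (by decide)]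
                                  simp only [hb0, hb1, hb2, hb3, hb4, hb5, hb6, hb7, hb8, hb9, hb10, hb11, hb12, hb13, hb14, List.any_cons, List.any_nil, Bool.or_true, Bool.true_or, Bool.or_false]
                                  rfl
                              | false =>
                                cases hb15 : PySem.Str.isIn "most" (PySem.Str.lower s) with
                                | true =>
                                    rw [pvSkip _ _ _ _ _ _ hb0, pvSkip _ _ _ _ _ _ hb1, pvSkip _ _ _ _ _ _ hb2, pvSkip _ _ _ _ _ _ hb3, pvSkip _ _ _ _ _ _ hb4, pvSkip _ _ _ _ _ _ hb5, pvSkip _ _ _ _ _ _ hb6, pvSkip _ _ _ _ _ _ hb7, pvSkip _ _ _ _ _ _ hb8, pvSkip _ _ _ _ _ _ hb9, pvSkip _ _ _ _ _ _ hb10, pvSkip _ _ _ _ _ _ hb11, pvSkip _ _ _ _ _ _ hb12, pvSkip _ _ _ _ _ _ hb13, pvSkip _ _ _ _ _ _ hb14, pvHit _ _ _ _ _ hb15, pvSat _ _ _ _ (by decide)]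
                                    simp only [hb0, hb1, hb2, hb3, hb4, hb5, hb6, hb7, hb8, hb9, hb10, hb11, hb12, hb13, hb14, hb15, List.any_cons, List.any_nil, Bool.or_true, Bool.or_false]
                                    rfl
                                | false =>
                                  cases hb16 : PySem.Str.isIn "min" (PySem.Str.lower s) with
                                  | true =>
                                      rw [pvSkip _ _ _ _ _ _ hb0, pvSkip _ _ _ _ _ _ hb1, pvSkip _ _ _ _ _ _ hb2, pvSkip _ _ _ _ _ _ hb3, pvSkip _ _ _ _ _ _ hb4, pvSkip _ _ _ _ _ _ hb5, pvSkip _ _ _ _ _ _ hb6, pvSkip _ _ _ _ _ _ hb7, pvSkip _ _ _ _ _ _ hb8, pvSkip _ _ _ _ _ _ hb9, pvSkip _ _ _ _ _ _ hb10, pvSkip _ _ _ _ _ _ hb11, pvSkip _ _ _ _ _ _ hb12, pvSkip _ _ _ _ _ _ hb13, pvSkip _ _ _ _ _ _ hb14, pvSkip _ _ _ _ _ _ hb15, pvHit _ _ _ _ _ hb16, pvSat _ _ _ _ (by decide)]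
                                      simp only [hb0, hb1, hb2, hb3, hb4, hb5, hb6, hb7, hb8, hb9, hb10, hb11, hb12, hb13, hb14, hb15, hb16, List.any_cons, List.any_nil, Bool.true_or, Bool.or_false]
                                      rfl
                                  | false =>
                                    cases hb17 : PySem.Str.isIn "minimum" (PySem.Str.lower s) with
                                    | true =>
                                        rw [pvSkip _ _ _ _ _ _ hb0, pvSkip _ _ _ _ _ _ hb1, pvSkip _ _ _ _ _ _ hb2, pvSkip _ _ _ _ _ _ hb3, pvSkip _ _ _ _ _ _ hb4, pvSkip _ _ _ _ _ _ hb5, pvSkip _ _ _ _ _ _ hb6, pvSkip _ _ _ _ _ _ hb7, pvSkip _ _ _ _ _ _ hb8, pvSkip _ _ _ _ _ _ hb9, pvSkip _ _ _ _ _ _ hb10, pvSkip _ _ _ _ _ _ hb11, pvSkip _ _ _ _ _ _ hb12, pvSkip _ _ _ _ _ _ hb13, pvSkip _ _ _ _ _ _ hb14, pvSkip _ _ _ _ _ _ hb15, pvSkip _ _ _ _ _ _ hb16, pvHit _ _ _ _ _ hb17, pvSat _ _ _ _ (by decide)]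
                                        simp only [hb0, hb1, hb2, hb3, hb4, hb5, hb6, hb7, hb8, hb9, hb10, hb11, hb12, hb13, hb14, hb15, hb16, hb17, List.any_cons, List.any_nil, Bool.or_true, Bool.true_or, Bool.or_false]
                                        rfl
                                    | false =>
                                      cases hb18 : PySem.Str.isIn "lowest" (PySem.Str.lower s) with
                                      | true =>
                                          rw [pvSkip _ _ _ _ _ _ hb0, pvSkip _ _ _ _ _ _ hb1, pvSkip _ _ _ _ _ _ hb2, pvSkip _ _ _ _ _ _ hb3, pvSkip _ _ _ _ _ _ hb4, pvSkip _ _ _ _ _ _ hb5, pvSkip _ _ _ _ _ _ hb6, pvSkip _ _ _ _ _ _ hb7, pvSkip _ _ _ _ _ _ hb8, pvSkip _ _ _ _ _ _ hb9, pvSkip _ _ _ _ _ _ hb10, pvSkip _ _ _ _ _ _ hb11, pvSkip _ _ _ _ _ _ hb12, pvSkip _ _ _ _ _ _ hb13, pvSkip _ _ _ _ _ _ hb14, pvSkip _ _ _ _ _ _ hb15, pvSkip _ _ _ _ _ _ hb16, pvSkip _ _ _ _ _ _ hb17, pvHit _ _ _ _ _ hb18, pvSat _ _ _ _ (by decide)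]
                                          simp only [hb0, hb1, hb2, hb3, hb4, hb5, hb6, hb7, hb8, hb9, hb10, hb11, hb12, hb13, hb14, hb15, hb16, hb17, hb18, List.any_cons, List.any_nil, Bool.or_true, Bool.true_or, Bool.or_false]
                                          rfl
                                      | false =>
                                        cases hb19 : PySem.Str.isIn "least" (PySem.Str.lower s) with
                                        | true =>
                                            rw [pvSkip _ _ _ _ _ _ hb0, pvSkip _ _ _ _ _ _ hb1, pvSkip _ _ _ _ _ _ hb2, pvSkip _ _ _ _ _ _ hb3, pvSkip _ _ _ _ _ _ hb4, pvSkip _ _ _ _ _ _ hb5, pvSkip _ _ _ _ _ _ hb6, pvSkip _ _ _ _ _ _ hb7, pvSkip _ _ _ _ _ _ hb8, pvSkip _ _ _ _ _ _ hb9, pvSkip _ _ _ _ _ _ hb10, pvSkip _ _ _ _ _ _ hb11, pvSkip _ _ _ _ _ _ hb12, pvSkip _ _ _ _ _ _ hb13, pvSkip _ _ _ _ _ _ hb14, pvSkip _ _ _ _ _ _ hb15, pvSkip _ _ _ _ _ _ hb16, pvSkip _ _ _ _ _ _ hb17, pvSkip _ _ _ _ _ _ hb18, pvHit _ _ _ _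 _ hb19, pvSat _ _ _ _ (by decide)]
                                            simp only [hb0, hb1, hb2, hb3, hb4, hb5, hb6, hb7, hb8, hb9, hb10, hb11, hb12, hb13, hb14, hb15, hb16, hb17, hb18, hb19, List.any_cons, List.any_nil, Bool.or_true, Bool.or_false]
                                            rfl
                                        | false =>
                                          cases hb20 : PySem.Str.isIn "trend" (PySem.Str.lower s) with
                                          | true =>
                                              rw [pvSkip _ _ _ _ _ _ hb0, pvSkip _ _ _ _ _ _ hb1, pvSkip _ _ _ _ _ _ hb2, pvSkip _ _ _ _ _ _ hb3, pvSkip _ _ _ _ _ _ hb4, pvSkip _ _ _ _ _ _ hb5, pvSkip _ _ _ _ _ _ hb6, pvSkip _ _ _ _ _ _ hb7, pvSkip _ _ _ _ _ _ hb8, pvSkip _ _ _ _ _ _ hb9, pvSkip _ _ _ _ _ _ hb10, pvSkip _ _ _ _ _ _ hb11, pvSkip _ _ _ _ _ _ hb12, pvSkip _ _ _ _ _ _ hb13, pvSkip _ _ _ _ _ _ hb14, pvSkip _ _ _ _ _ _ hb15, pvSkip _ _ _ _ _ _ hb16, pvSkip _ _ _ _ _ _ hb17, pvSkip _ _ _ _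 _ _ hb18, pvSkip _ _ _ _ _ _ hb19, pvHit _ _ _ _ _ hb20, pvSat _ _ _ _ (by decide)]
                                              simp only [hb0, hb1, hb2, hb3, hb4, hb5, hb6, hb7, hb8, hb9, hb10, hb11, hb12, hb13, hb14, hb15, hb16, hb17, hb18, hb19, hb20, List.any_cons, List.any_nil, Bool.true_or, Bool.or_false]
                                              rfl
                                          | false =>
                                            cases hb21 : PySem.Str.isIn "over time" (PySem.Str.lower s) with
                                            | true =>
                                                rw [pvSkip _ _ _ _ _ _ hb0, pvSkip _ _ _ _ _ _ hb1, pvSkip _ _ _ _ _ _ hb2, pvSkip _ _ _ _ _ _ hb3, pvSkip _ _ _ _ _ _ hb4, pvSkip _ _ _ _ _ _ hb5, pvSkip _ _ _ _ _ _ hb6, pvSkip _ _ _ _ _ _ hb7, pvSkip _ _ _ _ _ _ hb8, pvSkip _ _ _ _ _ _ hb9, pvSkip _ _ _ _ _ _ hb10, pvSkip _ _ _ _ _ _ hb11, pvSkip _ _ _ _ _ _ hb12, pvSkip _ _ _ _ _ _ hb13, pvSkip _ _ _ _ _ _ hb14, pvSkip _ _ _ _ _ _ hb15, pvSkip _ _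 _ _ _ _ hb16, pvSkip _ _ _ _ _ _ hb17, pvSkip _ _ _ _ _ _ hb18, pvSkip _ _ _ _ _ _ hb19, pvSkip _ _ _ _ _ _ hb20, pvHit _ _ _ _ _ hb21, pvSat _ _ _ _ (by decide)]
                                                simp only [hb0, hb1, hb2, hb3, hb4, hb5, hb6, hb7, hb8, hb9, hb10, hb11, hb12, hb13, hb14, hb15, hb16, hb17, hb18, hb19, hb20, hb21, List.any_cons, List.any_nil, Bool.or_true, Bool.true_or, Bool.or_false]
                                                rfl
                                            | false =>
                                              cases hb22 : PySem.Str.isIn "by month" (PySem.Str.lower s) with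
                                              | true =>
                                                  rw [pvSkip _ _ _ _ _ _ hb0, pvSkip _ _ _ _ _ _ hb1, pvSkip _ _ _ _ _ _ hb2, pvSkip _ _ _ _ _ _ hb3, pvSkip _ _ _ _ _ _ hb4, pvSkip _ _ _ _ _ _ hb5, pvSkip _ _ _ _ _ _ hb6, pvSkip _ _ _ _ _ _ hb7, pvSkip _ _ _ _ _ _ hb8, pvSkip _ _ _ _ _ _ hb9, pvSkip _ _ _ _ _ _ hb10, pvSkip _ _ _ _ _ _ hb11, pvSkip _ _ _ _ _ _ hb12, pvSkip _ _ _ _ _ _ hb13, pvSkip _ _ _ _ _ _ hb14, pvSkip _ _ _ _ _ _ hb15, pvSkip _ _ _ _ _ _ hb16, pvSkip _ _ _ _ _ _ hb17, pvSkip _ _ _ _ _ _ hb18, pvSkip _ _ _ _ _ _ hb19, pvSkip _ _ _ _ _ _ hb20, pvSkip _ _ _ _ _ _ hb21, pvHit _ _ _ _ _ hb22, pvSat _ _ _ _ (by decide)]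
                                                  simp only [hb0, hb1, hb2, hb3, hb4, hb5, hb6, hb7, hb8, hb9, hb10, hb11, hb12, hb13, hb14, hb15, hb16, hb17, hb18, hb19, hb20, hb21, hb22, List.any_cons, List.any_nil, Bool.or_true, Bool.true_or, Bool.or_false]
                                                  rfl
                                              | false =>
                                                cases hb23 : PySem.Str.isIn "by year" (PySem.Str.lower s) with
                                                | true =>
                                                    rw [pvSkip _ _ _ _ _ _ hb0, pvSkip _ _ _ _ _ _ hb1, pvSkip _ _ _ _ _ _ hb2, pvSkip _ _ _ _ _ _ hb3, pvSkip _ _ _ _ _ _ hb4, pvSkip _ _ _ _ _ _ hb5, pvSkip _ _ _ _ _ _ hb6, pvSkip _ _ _ _ _ _ hb7, pvSkip _ _ _ _ _ _ hb8, pvSkip _ _ _ _ _ _ hb9, pvSkip _ _ _ _ _ _ hb10, pvSkip _ _ _ _ _ _ hb11, pvSkip _ _ _ _ _ _ hb12, pvSkip _ _ _ _ _ _ hb13, pvSkip _ _ _ _ _ _ hb14, pvSkip _ _ _ _ _ _ hb15, pvSkip _ _ _ _ _ _ hb16, pvSkip _ _ _ _ _ _ hb17, pvSkip _ _ _ _ _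 _ hb18, pvSkip _ _ _ _ _ _ hb19, pvSkip _ _ _ _ _ _ hb20, pvSkip _ _ _ _ _ _ hb21, pvSkip _ _ _ _ _ _ hb22, pvHit _ _ _ _ _ hb23, pvSat _ _ _ _ (by decide)]
                                                    simp only [hb0, hb1, hb2, hb3, hb4, hb5, hb6, hb7, hb8, hb9, hb10, hb11, hb12, hb13, hb14, hb15, hb16, hb17, hb18, hb19, hb20, hb21, hb22, hb23, List.any_cons, List.any_nil, Bool.or_true, Bool.or_false]
                                                    rfl
                                                | false =>
                                                  cases hb24 : PySem.Str.isIn "top" (PySem.Str.lower s) with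
                                                  | true =>
                                                      rw [pvSkip _ _ _ _ _ _ hb0, pvSkip _ _ _ _ _ _ hb1, pvSkip _ _ _ _ _ _ hb2, pvSkip _ _ _ _ _ _ hb3, pvSkip _ _ _ _ _ _ hb4, pvSkip _ _ _ _ _ _ hb5, pvSkip _ _ _ _ _ _ hb6, pvSkip _ _ _ _ _ _ hb7, pvSkip _ _ _ _ _ _ hb8, pvSkip _ _ _ _ _ _ hb9, pvSkip _ _ _ _ _ _ hb10, pvSkip _ _ _ _ _ _ hb11, pvSkip _ _ _ _ _ _ hb12, pvSkip _ _ _ _ _ _ hb13, pvSkip _ _ _ _ _ _ hb14, pvSkip _ _ _ _ _ _ hb15, pvSkip _ _ _ _ _ _ hb16, pvSkip _ _ _ _ _ _ hb17, pvSkip _ _ _ _ _ _ hb18, pvSkip _ _ _ _ _ _ hb19, pvSkip _ _ _ _ _ _ hb20, pvSkip _ _ _ _ _ _ hb21, pvSkip _ _ _ _ _ _ hb22, pvSkip _ _ _ _ _ _ hb23, pvHit _ _ _ _ _ hb24, pvSat _ _ _ _ (by decide)]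
                                                      simp only [hb0, hb1, hb2, hb3, hb4, hb5, hb6, hb7, hb8, hb9, hb10, hb11, hb12, hb13, hb14, hb15, hb16, hb17, hb18, hb19, hb20, hb21, hb22, hb23, hb24, List.any_cons, List.any_nil, Bool.true_or, Bool.or_false]
                                                      rfl
                                                  | false =>
                                                    cases hb25 : PySem.Str.isIn "best" (PySem.Str.lower s) with
                                                    | true =>
                                                        rw [pvSkip _ _ _ _ _ _ hb0, pvSkip _ _ _ _ _ _ hb1, pvSkip _ _ _ _ _ _ hb2, pvSkip _ _ _ _ _ _ hb3, pvSkip _ _ _ _ _ _ hb4, pvSkip _ _ _ _ _ _ hb5, pvSkip _ _ _ _ _ _ hb6, pvSkip _ _ _ _ _ _ hb7, pvSkip _ _ _ _ _ _ hb8, pvSkip _ _ _ _ _ _ hb9, pvSkip _ _ _ _ _ _ hb10, pvSkip _ _ _ _ _ _ hb11, pvSkip _ _ _ _ _ _ hb12, pvSkip _ _ _ _ _ _ hb13, pvSkip _ _ _ _ _ _ hb14, pvSkip _ _ _ _ _ _ hb15, pvSkip _ _ _ _ _ _ hb16, pvSkip _ _ _ _ _ _ hb17, pvSkip _ _ _ _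 _ _ hb18, pvSkip _ _ _ _ _ _ hb19, pvSkip _ _ _ _ _ _ hb20, pvSkip _ _ _ _ _ _ hb21, pvSkip _ _ _ _ _ _ hb22, pvSkip _ _ _ _ _ _ hb23, pvSkip _ _ _ _ _ _ hb24, pvHit _ _ _ _ _ hb25, pvSat _ _ _ _ (by decide)]
                                                        simp only [hb0, hb1, hb2, hb3, hb4, hb5, hb6, hb7, hb8, hb9, hb10, hb11, hb12, hb13, hb14, hb15, hb16, hb17, hb18, hb19, hb20, hb21, hb22, hb23, hb24, hb25, List.any_cons, List.any_nil, Bool.or_true, Bool.true_or, Bool.or_false]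
                                                        rfl
                                                    | false =>
                                                      cases hb26 : PySem.Str.isIn "highest ranked" (PySem.Str.lower s) with
                                                      | true =>
                                                          rw [pvSkip _ _ _ _ _ _ hb0, pvSkip _ _ _ _ _ _ hb1, pvSkip _ _ _ _ _ _ hb2, pvSkip _ _ _ _ _ _ hb3, pvSkip _ _ _ _ _ _ hb4, pvSkip _ _ _ _ _ _ hb5, pvSkip _ _ _ _ _ _ hb6, pvSkip _ _ _ _ _ _ hb7, pvSkip _ _ _ _ _ _ hb8, pvSkip _ _ _ _ _ _ hb9, pvSkip _ _ _ _ _ _ hb10, pvSkip _ _ _ _ _ _ hb11, pvSkip _ _ _ _ _ _ hb12, pvSkip _ _ _ _ _ _ hb13, pvSkip _ _ _ _ _ _ hb14, pvSkip _ _ _ _ _ _ hb15, pvSkip _ _ _ _ _ _ hb16, pvSkip _ _ _ _ _ _ hb17, pvSkip _ _ _ _ _ _ hb18, pvSkip _ _ _ _ _ _ hb19, pvSkip _ _ _ _ _ _ hb20, pvSkip _ _ _ _ _ _ hb21, pvSkip _ _ _ _ _ _ hb22, pvSkip _ _ _ _ _ _ hb23, pvSkip _ _ _ _ _ _ hb24,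 pvSkip _ _ _ _ _ _ hb25, pvHit _ _ _ _ _ hb26, pvSat _ _ _ _ (by decide)]
                                                          simp only [hb0, hb1, hb2, hb3, hb4, hb5, hb6, hb7, hb8, hb9, hb10, hb11, hb12, hb13, hb14, hb15, hb16, hb17, hb18, hb19, hb20, hb21, hb22, hb23, hb24, hb25, hb26, List.any_cons, List.any_nil, Bool.or_true, Bool.or_false]
                                                          rfl
                                                      | false =>
                                                        rw [pvSkip _ _ _ _ _ _ hb0, pvSkip _ _ _ _ _ _ hb1, pvSkip _ _ _ _ _ _ hb2, pvSkip _ _ _ _ _ _ hb3, pvSkip _ _ _ _ _ _ hb4, pvSkip _ _ _ _ _ _ hb5, pvSkip _ _ _ _ _ _ hb6, pvSkip _ _ _ _ _ _ hb7, pvSkip _ _ _ _ _ _ hb8, pvSkip _ _ _ _ _ _ hb9, pvSkip _ _ _ _ _ _ hb10, pvSkip _ _ _ _ _ _ hb11, pvSkip _ _ _ _ _ _ hb12, pvSkip _ _ _ _ _ _ hb13, pvSkip _ _ _ _ _ _ hb14, pvSkip _ _ _ _ _ _ hb15, pvSkip _ _ _ _ _ _ hb16, pvSkip _ _ _ _ _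 _ hb17, pvSkip _ _ _ _ _ _ hb18, pvSkip _ _ _ _ _ _ hb19, pvSkip _ _ _ _ _ _ hb20, pvSkip _ _ _ _ _ _ hb21, pvSkip _ _ _ _ _ _ hb22, pvSkip _ _ _ _ _ _ hb23, pvSkip _ _ _ _ _ _ hb24, pvSkip _ _ _ _ _ _ hb25, pvSkip _ _ _ _ _ _ hb26]
                                                        simp only [hb0, hb1, hb2, hb3, hb4, hb5, hb6, hb7, hb8, hb9, hb10, hb11, hb12, hb13, hb14, hb15, hb16, hb17, hb18, hb19, hb20, hb21, hb22, hb23, hb24, hb25, hb26, List.any_cons, List.any_nil, Bool.or_false]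
                                                        rfl
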